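-- pv_equiv track=rewrite | github.com/HarryHD123/LinearSolverCode | LinProgSolver.py | multiple_optima_finder
-- ===== SOURCE A (Python) =====
-- def multiple_optima_finder(Tableau, Headings):
--     "Checks for multiple optima"
--
--     MultipleOptimaList = []
--
--     XVarCol = [i for i, j in enumerate(Headings) if 'x' in j]
--
--     # for i in range(XCount):  # For each X column
--     for i in XVarCol:  # For each X column
--         Column = []
--         NonZeroCount = 0
--         for j in range(len(Tableau)):
--             Column.append(Tableau[j][i])
--             if float(Tableau[j][i]) != 0.0:
--                 NonZeroCount += 1
--
--         if Tableau[-1][i] == 0 and NonZeroCount > 1: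
--             MultipleOptimaList.append(i)
--
--     return MultipleOptimaList
-- ===== SOURCE B (Python) =====
-- def multiple_optima_finder(Tableau, Headings):
--     "Checks for multiple optima"
--
--     # One row-major pass: count nonzero entries per column in a dict.
--     counts = {}
--     for row in Tableau:
--         for i, v in enumerate(row):
--             if float(v) != 0.0:
--                 counts[i] = counts.get(i, 0) + 1
--
--     # Then filter the X-columns in heading order.
--     return [i for i, h in enumerate(Headings)
--             if 'x' in h and Tableau[-1][i] == 0 and counts.get(i, 0) > 1]
-- ===== Notes on version B (the rewrite author's own statement) =====
-- stated objective: alternative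
-- what changed: Replaces the per-X-column inner scan over all rows by one row-major pass that builds a per-column nonzero-count dict once, followed by a single filtering comprehension over the headings.
import Mathlib
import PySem

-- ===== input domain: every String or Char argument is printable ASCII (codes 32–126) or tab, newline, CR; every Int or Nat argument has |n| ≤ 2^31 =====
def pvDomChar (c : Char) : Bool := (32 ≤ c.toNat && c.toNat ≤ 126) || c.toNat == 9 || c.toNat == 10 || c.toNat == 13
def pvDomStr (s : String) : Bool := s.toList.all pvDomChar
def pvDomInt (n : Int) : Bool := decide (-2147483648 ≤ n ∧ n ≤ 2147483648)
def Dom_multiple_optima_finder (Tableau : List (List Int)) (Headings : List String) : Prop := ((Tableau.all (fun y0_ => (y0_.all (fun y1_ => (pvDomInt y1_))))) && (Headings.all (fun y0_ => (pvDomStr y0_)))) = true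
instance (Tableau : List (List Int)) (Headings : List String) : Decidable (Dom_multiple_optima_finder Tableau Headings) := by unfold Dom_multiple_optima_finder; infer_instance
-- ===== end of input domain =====

-- B builds the per-column nonzero counts in one row-major pass over a dict, then filters the
-- X-columns in a single comprehension; A scans each X-column over all rows separately.

-- ===== PORT A =====
-- literal port of A; float(v) != 0.0 is exact integer inequality on the stated |n| ≤ 2^31 domain
def multiple_optima_finder (Tableau : List (List Int)) (Headings : List String) : List Int :=
  let XVarCol := ((PySem.List.enumerate Headings).filter (fun p => PySem.Str.isIn "x" p.2)).map (fun p => p.1)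
  XVarCol.foldl (fun MultipleOptimaList i =>
    let st := (PySem.List.pyRange 0 (Tableau.length : Int)).foldl
      (fun (st : List Int × Int) j =>
        (st.1 ++ [PySem.List.pyGetD (PySem.List.pyGetD Tableau j []) i 0],
         if PySem.List.pyGetD (PySem.List.pyGetD Tableau j []) i 0 ≠ 0 then st.2 + 1 else st.2))
      ([], 0)
    if (PySem.List.pyGetD (PySem.List.pyGetD Tableau (-1) []) i 0 == 0 && decide (st.2 > 1))
    then MultipleOptimaList ++ [i] else MultipleOptimaList) []

-- ===== PORT B =====
-- literal port of Source B: one row-major counting pass into a dict, then one filtering pass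
def multiple_optima_finder_alt (Tableau : List (List Int)) (Headings : List String) : List Int :=
  let counts : PySem.Dict Int Int := Tableau.foldl (fun counts row =>
      (PySem.List.enumerate row).foldl (fun counts p =>
        if p.2 ≠ 0 then counts.insert p.1 (counts.getD p.1 0 + 1) else counts) counts)
    PySem.Dict.empty
  ((PySem.List.enumerate Headings).filter (fun p =>
      PySem.Str.isIn "x" p.2 &&
      (PySem.List.pyGetD (PySem.List.pyGetD Tableau (-1) []) p.1 0 == 0) &&
      decide (counts.getD p.1 0 > 1))).map (fun p => p.1)

-- ===== PRECONDITION & SPEC =====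
-- Pre_ excludes exactly the inputs where A raises IndexError: an X-column index out of range in
-- some row (Tableau[j][i]) or an empty Tableau with an X heading (Tableau[-1]).
def Pre_multiple_optima_finder (Tableau : List (List Int)) (Headings : List String) : Prop :=
  ∀ p ∈ PySem.List.enumerate Headings, PySem.Str.isIn "x" p.2 = true →
    Tableau ≠ [] ∧ ∀ row ∈ Tableau, p.1 < (row.length : Int)
instance (Tableau : List (List Int)) (Headings : List String) : Decidable (Pre_multiple_optima_finder Tableau Headings) := by unfold Pre_multiple_optima_finder; infer_instance

def pvWitness_multiple_optima_finder : List (List Int) × List String := ([[1, 0], [1, 1]], ["x1", "s1"])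

def Spec_multiple_optima_finder (Tableau : List (List Int)) (Headings : List String) (out : List Int) : Prop := out = multiple_optima_finder_alt Tableau Headings
instance (Tableau : List (List Int)) (Headings : List String) (out : List Int) : Decidable (Spec_multiple_optima_finder Tableau Headings out) := by unfold Spec_multiple_optima_finder; infer_instance

-- ===== CLAIM (what is proved, stated in full; the proofs are below) =====
def Claim_equal_multiple_optima_finder : Prop := ∀ (Tableau : List (List Int)) (Headings : List String), Dom_multiple_optima_finder Tableau Headings → Pre_multiple_optima_finder Tableau Headings → Spec_multiple_optima_finder Tableau Headings (multiple_optima_finder Tableau Headings)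

-- ===== LEMMAS AND PROOFS =====

-- A's inner loop: the second component is the nonzero count of column i
theorem pv_snd_fold (rows : List (List Int)) (init : List Int × Int) (i : Int) :
    (rows.foldl (fun (st : List Int × Int) row =>
      (st.1 ++ [PySem.List.pyGetD row i 0],
       if PySem.List.pyGetD row i 0 ≠ 0 then st.2 + 1 else st.2)) init).2
    = init.2 + ((rows.countP (fun row => decide (PySem.List.pyGetD row i 0 ≠ 0))) : Int) := by
  induction rows generalizing init with
  | nil => simp
  | cons r rows ih =>
    simp only [List.foldl_cons, List.countP_cons, ih]
    by_cases h : PySem.List.pyGetD r i 0 ≠ 0 <;> simp [h] <;> ring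

-- B's per-row dict update: getD after folding a pair list
theorem pv_getD_fold_pairs (l : List (Int × Int)) (d : PySem.Dict Int Int) (i : Int) :
    ((l.foldl (fun (d : PySem.Dict Int Int) p =>
        if p.2 ≠ 0 then d.insert p.1 (d.getD p.1 0 + 1) else d) d).getD i 0)
    = d.getD i 0 + ((l.filter (fun q => decide (q.1 = i) && decide (q.2 ≠ 0))).length : Int) := by
  induction l generalizing d with
  | nil => simp
  | cons q l ih =>
    simp only [List.foldl_cons, List.filter_cons, ih]
    by_cases h2 : q.2 ≠ 0
    · by_cases h1 : q.1 = i
      · subst h1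
        simp [h2]
        ring
      · simp [h2, h1, PySem.Dict.getD_insert, Ne.symm h1]
    · simp [h2]

-- no pair of enumerate row s has first component i when i < s
theorem pv_filter_enum_lt (row : List Int) (s i : Int) (h : i < s) :
    (PySem.List.enumerate row s).filter (fun q => decide (q.1 = i) && decide (q.2 ≠ 0)) = [] := by
  induction row generalizing s with
  | nil => simp [PySem.List.enumerate]
  | cons x row ih =>
    rw [PySem.List.enumerate_cons]
    simp only [List.filter_cons]
    split_ifs with hc
    · simp only [Bool.and_eq_true, decide_eq_true_eq] at hc; omega
    · exact ih (s + 1) (by omega)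

-- exactly one pair of enumerate row s has first component s + k (k < len row)
theorem pv_filter_enum_len (row : List Int) (s : Int) (k : Nat) (hk : k < row.length) :
    ((PySem.List.enumerate row s).filter
        (fun q => decide (q.1 = s + (k : Int)) && decide (q.2 ≠ 0))).length
    = if row[k] ≠ 0 then 1 else 0 := by
  induction row generalizing s k with
  | nil => simp at hk
  | cons x row ih =>
    rw [PySem.List.enumerate_cons]
    cases k with
    | zero =>
      simp only [List.filter_cons]
      have h0 : s + ((0 : Nat) : Int) = s := by simp
      rw [h0, pv_filter_enum_lt row (s + 1) s (by omega)]
      by_cases hx : x ≠ 0 <;> simp [hx]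
    | succ k =>
      simp only [List.filter_cons]
      have hsh : s + ((k + 1 : Nat) : Int) = (s + 1) + (k : Int) := by push_cast; ring
      rw [hsh, if_neg (by simp only [Bool.and_eq_true, decide_eq_true_eq]; rintro ⟨h1, -⟩; omega)]
      have := ih (s + 1) k (by simpa using hk)
      simpa only [List.getElem_cons_succ] using this

-- B's full counting pass: the dict value at a column k present in every row
theorem pv_counts_getD (T : List (List Int)) (d : PySem.Dict Int Int) (k : Nat)
    (hT : ∀ row ∈ T, k < row.length) :
    ((T.foldl (fun (d : PySem.Dict Int Int) row =>
        (PySem.List.enumerate row).foldl (fun (d : PySem.Dict Int Int) p =>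
          if p.2 ≠ 0 then d.insert p.1 (d.getD p.1 0 + 1) else d) d) d).getD (k : Int) 0)
    = d.getD (k : Int) 0 + ((T.countP (fun row => decide (PySem.List.pyGetD row (k : Int) 0 ≠ 0))) : Int) := by
  induction T generalizing d with
  | nil => simp
  | cons r T ih =>
    have hr : k < r.length := hT r (by simp)
    simp only [List.foldl_cons, List.countP_cons]
    rw [ih _ (fun row hrow => hT row (by simp [hrow]))]
    rw [pv_getD_fold_pairs]
    have h0 : ((0 : Int) + (k : Int)) = (k : Int) := by ring
    have := pv_filter_enum_len r 0 k hr
    rw [h0] at this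
    rw [this]
    have hg : PySem.List.pyGetD r (k : Int) 0 = r[k] := by
      rw [PySem.List.pyGetD_natCast, List.getD_eq_getElem r 0 hr]
    by_cases hx : r[k] ≠ 0 <;> simp [hx, hg] <;> ring

-- ===== VERDICT (by name: the statement is the Claim_ definition above) =====
theorem multiple_optima_finder_spec : Claim_equal_multiple_optima_finder := by
  intro Tableau Headings _ hPre
  unfold Spec_multiple_optima_finder multiple_optima_finder multiple_optima_finder_alt
  rw [PySem.List.foldl_append_if
      (fun i => (PySem.List.pyGetD (PySem.List.pyGetD Tableau (-1) []) i 0 == 0 &&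
        decide (((PySem.List.pyRange 0 (Tableau.length : Int)).foldl
          (fun (st : List Int × Int) j =>
            (st.1 ++ [PySem.List.pyGetD (PySem.List.pyGetD Tableau j []) i 0],
             if PySem.List.pyGetD (PySem.List.pyGetD Tableau j []) i 0 ≠ 0 then st.2 + 1 else st.2))
          ([], 0)).2 > 1)))
      (fun i => i)]
  rw [List.filter_map, List.map_map]
  simp only [List.nil_append, List.filter_filter]
  congr 1
  apply List.filter_congr
  intro p hp
  by_cases hx : PySem.Str.isIn "x" p.2
  · obtain ⟨hTne, hlen⟩ := hPre p hp hx
    obtain ⟨k, hk, hpk⟩ := (PySem.List.mem_enumerate_iff Headings 0 p).1 hp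
    have hp1 : p.1 = (k : Int) := by rw [hpk]; simp
    have hlen' : ∀ row ∈ Tableau, k < row.length := by
      intro row hrow
      have := hlen row hrow
      rw [hp1] at this; exact_mod_cast this
    have hA : ((PySem.List.pyRange 0 (Tableau.length : Int)).foldl
          (fun (st : List Int × Int) j =>
            (st.1 ++ [PySem.List.pyGetD (PySem.List.pyGetD Tableau j []) p.1 0],
             if PySem.List.pyGetD (PySem.List.pyGetD Tableau j []) p.1 0 ≠ 0 then st.2 + 1 else st.2))
          ([], 0)).2
        = ((Tableau.countP (fun row => decide (PySem.List.pyGetD row p.1 0 ≠ 0))) : Int) := by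
      rw [PySem.List.foldl_pyRange_zero_pyGetD' Tableau []
        (fun (st : List Int × Int) row =>
          (st.1 ++ [PySem.List.pyGetD row p.1 0],
           if PySem.List.pyGetD row p.1 0 ≠ 0 then st.2 + 1 else st.2)) ([], 0)]
      rw [pv_snd_fold]; ring
    have hB : ((Tableau.foldl (fun (d : PySem.Dict Int Int) row =>
          (PySem.List.enumerate row).foldl (fun (d : PySem.Dict Int Int) q =>
            if q.2 ≠ 0 then d.insert q.1 (d.getD q.1 0 + 1) else d) d) PySem.Dict.empty).getD p.1 0)
        = ((Tableau.countP (fun row => decide (PySem.List.pyGetD row p.1 0 ≠ 0))) : Int) := by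
      rw [hp1]
      rw [pv_counts_getD Tableau PySem.Dict.empty k hlen']
      simp [PySem.Dict.empty, PySem.Dict.getD, PySem.Dict.get?]
    simp only [hx, Function.comp_apply, hA, hB, Bool.true_and, Bool.and_true]
  · have hxf : PySem.Chars.isIn ['x'] p.2.toList = false := by
      simp only [PySem.Str.isIn_eq] at hx
      simpa using hx
    simp [hxf]
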